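-- pv_equiv track=rewrite | github.com/binghaobhw/topic-segmentation | topic-segmentation/evaluation.py | boundary_indices_to_masses
-- ===== SOURCE A (Python) =====
-- def boundary_indices_to_masses(gap_count, boundary_indices):
--     """
--     >>> boundary_indices_to_masses(12, [3, 10])
--     [4, 7, 2]
--     >>> boundary_indices_to_masses(12, [])
--     [13]
--     >>> boundary_indices_to_masses(12, [11])
--     [12, 1]
--     """
--     masses = []
--     previous = -1
--     for i in boundary_indices:
--         masses.append(i - previous)
--         previous = i
--     masses.append(gap_count - previous)
--     return masses
-- ===== SOURCE B (Python) =====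
-- def boundary_indices_to_masses(gap_count, boundary_indices):
--     # Divide and conquer: segment masses of the interval (lo, hi] cut by the
--     # sorted-position list bs are obtained by picking the middle boundary b
--     # and concatenating the masses of the two half-problems.
--     def seg(lo, hi, bs):
--         if not bs:
--             return [hi - lo]
--         m = len(bs) // 2
--         b = bs[m]
--         return seg(lo, b, bs[:m]) + seg(b, hi, bs[m + 1:])
--     return seg(-1, gap_count, list(boundary_indices))
-- ===== Notes on version B (the rewrite author's own statement) =====
-- stated objective: alternative
-- what changed: Replaces the forward running-previous accumulator loop with a divide-and-conquer recursion: pick the middle boundary and concatenate the segment masses of the two half-intervals, with sentinels -1 and gap_count as the outer interval ends.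
import Mathlib
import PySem

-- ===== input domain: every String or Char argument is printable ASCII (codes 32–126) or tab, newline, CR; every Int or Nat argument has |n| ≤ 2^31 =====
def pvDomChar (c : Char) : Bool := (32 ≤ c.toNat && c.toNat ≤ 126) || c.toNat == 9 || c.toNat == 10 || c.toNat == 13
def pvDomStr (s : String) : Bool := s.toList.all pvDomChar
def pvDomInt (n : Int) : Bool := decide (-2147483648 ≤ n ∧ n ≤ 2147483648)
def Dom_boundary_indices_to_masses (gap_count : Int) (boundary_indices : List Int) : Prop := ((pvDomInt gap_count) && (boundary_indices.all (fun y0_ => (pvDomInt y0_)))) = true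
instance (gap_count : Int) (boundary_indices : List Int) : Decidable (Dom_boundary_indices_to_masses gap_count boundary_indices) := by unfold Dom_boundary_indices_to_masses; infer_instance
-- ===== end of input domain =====

-- ===== PORT A =====
-- B differs by divide-and-conquer on the middle boundary instead of A's forward running-previous loop (alternative decomposition).
-- A: forward loop carrying (masses, previous); final append of gap_count - previous.
def boundary_indices_to_masses (gap_count : Int) (boundary_indices : List Int) : List Int :=
  let s := boundary_indices.foldl (fun (s : List Int × Int) i => (s.1 ++ [i - s.2], i)) ([], -1)
  s.1 ++ [gap_count - s.2]

-- ===== PORT B =====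
-- B's helper seg(lo, hi, bs): split at the middle boundary bs[m]; bs[m] on a nonempty list is exact as getD.
def pvSeg (lo hi : Int) (bs : List Int) : List Int :=
  if h : bs = [] then [hi - lo]
  else
    let m := bs.length / 2
    let b := bs.getD m 0
    pvSeg lo b (bs.take m) ++ pvSeg b hi (bs.drop (m + 1))
termination_by bs.length
decreasing_by
  · have := List.length_pos_of_ne_nil h
    simpa using by omega
  · have := List.length_pos_of_ne_nil h
    simp
    omega

def boundary_indices_to_masses_alt (gap_count : Int) (boundary_indices : List Int) : List Int :=
  pvSeg (-1) gap_count boundary_indices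

-- ===== PRECONDITION & SPEC =====
def Spec_boundary_indices_to_masses (gap_count : Int) (boundary_indices : List Int) (out : List Int) : Prop := out = boundary_indices_to_masses_alt gap_count boundary_indices
instance (gap_count : Int) (boundary_indices : List Int) (out : List Int) : Decidable (Spec_boundary_indices_to_masses gap_count boundary_indices out) := by unfold Spec_boundary_indices_to_masses; infer_instance

-- ===== CLAIM =====
def Claim_equal_boundary_indices_to_masses : Prop := ∀ (gap_count : Int) (boundary_indices : List Int), Dom_boundary_indices_to_masses gap_count boundary_indices → Spec_boundary_indices_to_masses gap_count boundary_indices (boundary_indices_to_masses gap_count boundary_indices)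

-- ===== LEMMAS AND PROOFS =====

-- reference form: consecutive differences with previous lo and final end hi
def pvDiffs (lo : Int) (bs : List Int) (hi : Int) : List Int :=
  match bs with
  | [] => [hi - lo]
  | b :: t => (b - lo) :: pvDiffs b t hi

theorem pvA_loop (bs : List Int) (m : List Int) (p g : Int) :
    (bs.foldl (fun (s : List Int × Int) i => (s.1 ++ [i - s.2], i)) (m, p)).1
      ++ [g - (bs.foldl (fun (s : List Int × Int) i => (s.1 ++ [i - s.2], i)) (m, p)).2]
    = m ++ pvDiffs p bs g := by
  induction bs generalizing m p with
  | nil => simp [pvDiffs]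
  | cons b t ih => simp [pvDiffs, ih]

theorem pvDiffs_split (l1 : List Int) (b : Int) (l2 : List Int) (lo hi : Int) :
    pvDiffs lo (l1 ++ b :: l2) hi = pvDiffs lo l1 b ++ pvDiffs b l2 hi := by
  induction l1 generalizing lo with
  | nil => simp [pvDiffs]
  | cons a t ih => simp [pvDiffs, ih]

theorem pvSeg_diffs (lo hi : Int) (bs : List Int) : pvSeg lo hi bs = pvDiffs lo bs hi := by
  induction lo, hi, bs using pvSeg.induct with
  | case1 lo hi =>
      rw [pvSeg]; simp [pvDiffs]
  | case2 lo hi bs h m b ih1 ih2 =>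
      rw [pvSeg]
      simp only [h, dite_false]
      have hm : m < bs.length := by
        have := List.length_pos_of_ne_nil h
        omega
      have hb : b = bs[m] := by
        simp [b, List.getElem?_eq_getElem hm]
      have hsplit : bs = bs.take m ++ b :: bs.drop (m + 1) := by
        rw [hb, ← List.drop_eq_getElem_cons hm, List.take_append_drop]
      rw [ih1, ih2]
      conv_rhs => rw [hsplit]
      rw [pvDiffs_split]

-- ===== VERDICT =====
theorem boundary_indices_to_masses_spec : Claim_equal_boundary_indices_to_masses := by
  intro g bi _
  unfold Spec_boundary_indices_to_masses boundary_indices_to_masses boundary_indices_to_masses_alt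
  rw [pvSeg_diffs]
  simpa using pvA_loop bi [] (-1) g
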